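-- pv_equiv track=rewrite | github.com/kbricheno/VTM-Roller | methods.py | evaluate_dice
-- ===== SOURCE A (Python) =====
-- def evaluate_dice(_normalDiceList, _hungerDiceList):
--     resultTypes = {"successes": 0, "hungerSuccesses": 0,
--                    "crits": 0, "messyCrits": 0,
--                    "failures": 0, "hungerFailures": 0, "bestialFailures": 0}
--
--     for result in _normalDiceList:
--         if result == 10:
--             resultTypes["crits"] += 1
--         elif result >= 6:
--             resultTypes["successes"] += 1
--         else:
--             resultTypes["failures"] += 1
--
--     for result in _hungerDiceList:
--         if result == 10:
--             resultTypes["messyCrits"] += 1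
--         elif result >= 6:
--             resultTypes["hungerSuccesses"] += 1
--         elif result == 1:
--             resultTypes["bestialFailures"] += 1
--         else:
--             resultTypes["hungerFailures"] += 1
--
--     return resultTypes
-- ===== SOURCE B (Python) =====
-- def evaluate_dice(_normalDiceList, _hungerDiceList):
--     crits = _normalDiceList.count(10)
--     ge6 = sum(1 for x in _normalDiceList if x >= 6)
--     successes = ge6 - crits
--     failures = len(_normalDiceList) - ge6
--
--     messyCrits = _hungerDiceList.count(10)
--     hge6 = sum(1 for x in _hungerDiceList if x >= 6)
--     hungerSuccesses = hge6 - messyCrits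
--     bestialFailures = _hungerDiceList.count(1)
--     hungerFailures = len(_hungerDiceList) - hge6 - bestialFailures
--
--     return {"successes": successes, "hungerSuccesses": hungerSuccesses,
--             "crits": crits, "messyCrits": messyCrits,
--             "failures": failures, "hungerFailures": hungerFailures,
--             "bestialFailures": bestialFailures}
-- ===== Notes on version B (the rewrite author's own statement) =====
-- stated objective: simpler
-- what changed: Replaces the per-die if/elif branching loops by whole-list counts (count/len/sum of a predicate) and derives each of the seven categories by arithmetic on those counts.
import Mathlib
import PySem

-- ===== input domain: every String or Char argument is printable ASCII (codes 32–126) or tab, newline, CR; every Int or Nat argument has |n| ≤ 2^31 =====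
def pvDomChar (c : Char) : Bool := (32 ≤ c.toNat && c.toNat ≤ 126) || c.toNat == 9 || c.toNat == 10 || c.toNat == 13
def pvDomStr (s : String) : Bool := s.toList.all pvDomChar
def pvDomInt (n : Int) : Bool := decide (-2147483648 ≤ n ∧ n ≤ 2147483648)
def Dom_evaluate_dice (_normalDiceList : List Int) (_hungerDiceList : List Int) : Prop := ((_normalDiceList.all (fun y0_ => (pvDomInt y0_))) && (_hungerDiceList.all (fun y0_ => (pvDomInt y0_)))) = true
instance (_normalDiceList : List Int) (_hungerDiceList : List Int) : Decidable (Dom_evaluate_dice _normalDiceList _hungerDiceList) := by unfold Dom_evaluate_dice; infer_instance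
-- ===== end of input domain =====

-- B replaces A's per-die if/elif loops by whole-list counts combined arithmetically (same cost, simpler).

-- ===== PORT A =====
-- the body of A's first loop: bump the matching counter in the dict
def evalStepNormal (d : PySem.Dict String Int) (result : Int) : PySem.Dict String Int :=
  if result == 10 then d.modify "crits" 0 (· + 1)
  else if 6 ≤ result then d.modify "successes" 0 (· + 1)
  else d.modify "failures" 0 (· + 1)

-- the body of A's second loop
def evalStepHunger (d : PySem.Dict String Int) (result : Int) : PySem.Dict String Int :=
  if result == 10 then d.modify "messyCrits" 0 (· + 1)
  else if 6 ≤ result then d.modify "hungerSuccesses" 0 (· + 1)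
  else if result == 1 then d.modify "bestialFailures" 0 (· + 1)
  else d.modify "hungerFailures" 0 (· + 1)

def evaluate_dice (_normalDiceList : List Int) (_hungerDiceList : List Int) : List (String × Int) :=
  let resultTypes : PySem.Dict String Int :=
    PySem.Dict.ofList [("successes", 0), ("hungerSuccesses", 0),
                       ("crits", 0), ("messyCrits", 0),
                       ("failures", 0), ("hungerFailures", 0), ("bestialFailures", 0)]
  let resultTypes := _normalDiceList.foldl evalStepNormal resultTypes
  let resultTypes := _hungerDiceList.foldl evalStepHunger resultTypes
  resultTypes.items

-- ===== PORT B =====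
def evaluate_dice_alt (_normalDiceList : List Int) (_hungerDiceList : List Int) : List (String × Int) :=
  let crits : Int := _normalDiceList.count 10
  let ge6 : Int := _normalDiceList.countP (fun x => 6 ≤ x)
  let successes := ge6 - crits
  let failures := (_normalDiceList.length : Int) - ge6
  let messyCrits : Int := _hungerDiceList.count 10
  let hge6 : Int := _hungerDiceList.countP (fun x => 6 ≤ x)
  let hungerSuccesses := hge6 - messyCrits
  let bestialFailures : Int := _hungerDiceList.count 1
  let hungerFailures := (_hungerDiceList.length : Int) - hge6 - bestialFailures
  [("successes", successes), ("hungerSuccesses", hungerSuccesses),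
   ("crits", crits), ("messyCrits", messyCrits),
   ("failures", failures), ("hungerFailures", hungerFailures),
   ("bestialFailures", bestialFailures)]

-- ===== PRECONDITION & SPEC =====
def Spec_evaluate_dice (_normalDiceList : List Int) (_hungerDiceList : List Int) (out : List (String × Int)) : Prop := out = evaluate_dice_alt _normalDiceList _hungerDiceList
instance (_normalDiceList : List Int) (_hungerDiceList : List Int) (out : List (String × Int)) : Decidable (Spec_evaluate_dice _normalDiceList _hungerDiceList out) := by unfold Spec_evaluate_dice; infer_instance

-- ===== CLAIM (what is proved, stated in full; the proofs are below) =====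
def Claim_equal_evaluate_dice : Prop := ∀ (_normalDiceList : List Int) (_hungerDiceList : List Int), Dom_evaluate_dice _normalDiceList _hungerDiceList → Spec_evaluate_dice _normalDiceList _hungerDiceList (evaluate_dice _normalDiceList _hungerDiceList)

-- ===== LEMMAS AND PROOFS =====

-- the seven-counter dict state A's loops maintain
def dict7 (s hs c mc f hf bf : Int) : PySem.Dict String Int :=
  PySem.Dict.mk
    [("successes", s), ("hungerSuccesses", hs), ("crits", c), ("messyCrits", mc),
     ("failures", f), ("hungerFailures", hf), ("bestialFailures", bf)]

theorem mod_succ (s hs c mc f hf bf : Int) : (dict7 s hs c mc f hf bf).modify "successes" 0 (· + 1) = dict7 (s+1) hs c mc f hf bf := rfl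
theorem mod_hsucc (s hs c mc f hf bf : Int) : (dict7 s hs c mc f hf bf).modify "hungerSuccesses" 0 (· + 1) = dict7 s (hs+1) c mc f hf bf := rfl
theorem mod_crit (s hs c mc f hf bf : Int) : (dict7 s hs c mc f hf bf).modify "crits" 0 (· + 1) = dict7 s hs (c+1) mc f hf bf := rfl
theorem mod_mcrit (s hs c mc f hf bf : Int) : (dict7 s hs c mc f hf bf).modify "messyCrits" 0 (· + 1) = dict7 s hs c (mc+1) f hf bf := rfl
theorem mod_fail (s hs c mc f hf bf : Int) : (dict7 s hs c mc f hf bf).modify "failures" 0 (· + 1) = dict7 s hs c mc (f+1) hf bf := rfl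
theorem mod_hfail (s hs c mc f hf bf : Int) : (dict7 s hs c mc f hf bf).modify "hungerFailures" 0 (· + 1) = dict7 s hs c mc f (hf+1) bf := rfl
theorem mod_bfail (s hs c mc f hf bf : Int) : (dict7 s hs c mc f hf bf).modify "bestialFailures" 0 (· + 1) = dict7 s hs c mc f hf (bf+1) := rfl

theorem dict7_ext {s hs c mc f hf bf s' hs' c' mc' f' hf' bf' : Int}
    (h1 : s = s') (h2 : hs = hs') (h3 : c = c') (h4 : mc = mc')
    (h5 : f = f') (h6 : hf = hf') (h7 : bf = bf') :
    dict7 s hs c mc f hf bf = dict7 s' hs' c' mc' f' hf' bf' := by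
  simp [dict7, h1, h2, h3, h4, h5, h6, h7]

-- invariant of A's first loop: the dict stays a 7-entry literal whose counters grow by the counts of the prefix
theorem foldl_evalStepNormal (l : List Int) (s hs c mc f hf bf : Int) :
    l.foldl evalStepNormal (dict7 s hs c mc f hf bf) =
    dict7 (s + ((l.countP (fun x => 6 <= x) : Int) - (l.count 10 : Int))) hs
          (c + (l.count 10 : Int)) mc
          (f + ((l.length : Int) - (l.countP (fun x => 6 <= x) : Int))) hf bf := by
  induction l generalizing s c f with
  | nil => simp
  | cons x t ih =>
    simp only [List.foldl_cons, List.count_cons, List.countP_cons, List.length_cons, evalStepNormal]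
    by_cases h10 : x = 10
    · subst h10
      rw [if_pos (by decide), mod_crit, ih]
      apply dict7_ext <;> simp <;> ring_nf
    · rw [if_neg (by simpa using h10)]
      by_cases h6 : 6 <= x
      · rw [if_pos h6, mod_succ, ih]
        apply dict7_ext <;> simp [h10, h6] <;> ring_nf
      · rw [if_neg h6, mod_fail, ih]
        apply dict7_ext <;> simp [h10, h6] <;> ring_nf

-- invariant of A's second loop
theorem foldl_evalStepHunger (l : List Int) (s hs c mc f hf bf : Int) :
    l.foldl evalStepHunger (dict7 s hs c mc f hf bf) =
    dict7 s (hs + ((l.countP (fun x => 6 <= x) : Int) - (l.count 10 : Int)))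
          c (mc + (l.count 10 : Int)) f
          (hf + ((l.length : Int) - (l.countP (fun x => 6 <= x) : Int) - (l.count 1 : Int)))
          (bf + (l.count 1 : Int)) := by
  induction l generalizing hs mc hf bf with
  | nil => simp
  | cons x t ih =>
    simp only [List.foldl_cons, List.count_cons, List.countP_cons, List.length_cons, evalStepHunger]
    by_cases h10 : x = 10
    · subst h10
      rw [if_pos (by decide), mod_mcrit, ih]
      apply dict7_ext <;> simp <;> ring_nf
    · rw [if_neg (by simpa using h10)]
      by_cases h6 : 6 <= x
      · rw [if_pos h6, mod_hsucc, ih]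
        apply dict7_ext <;> simp [h10, h6, show x ≠ 1 by omega] <;> ring_nf
      · rw [if_neg h6]
        by_cases h1 : x = 1
        · subst h1
          rw [if_pos (by decide), mod_bfail, ih]
          apply dict7_ext <;> simp [h6] <;> ring_nf
        · rw [if_neg (by simpa using h1), mod_hfail, ih]
          apply dict7_ext <;> simp [h10, h6, h1] <;> ring_nf

-- ===== VERDICT (by name: the statement is the Claim_ definition above) =====
theorem evaluate_dice_spec : Claim_equal_evaluate_dice := by
  intro nl hl _
  unfold Spec_evaluate_dice evaluate_dice evaluate_dice_alt
  have hinit : PySem.Dict.ofList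
      [("successes", (0 : Int)), ("hungerSuccesses", 0), ("crits", 0), ("messyCrits", 0),
       ("failures", 0), ("hungerFailures", 0), ("bestialFailures", 0)] = dict7 0 0 0 0 0 0 0 := by decide
  simp only [hinit, foldl_evalStepNormal, foldl_evalStepHunger]
  simp [dict7]
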